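-- pv_equiv track=rewrite | github.com/ROHANBAIJU/will_it_rain | BACKEND/app/core/nasa_data_handler.py | _create_year_ranges_from_list
-- ===== SOURCE A (Python) =====
-- def _create_year_ranges_from_list(years: list) -> list:
--     """
--     Creates year ranges from a list of years for API fetching.
--     Groups consecutive years together, splits non-consecutive into separate ranges.
--
--     Args:
--         years (list): List of years to fetch
--
--     Returns:
--         list: List of tuples (start_year, end_year)
--     """
--     if not years:
--         return []
--
--     years_sorted = sorted(years)
--     ranges = []
--     start = years_sorted[0]
--     end = years_sorted[0]
--
--     for i in range(1, len(years_sorted)):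
--         if years_sorted[i] == end + 1:
--             # Consecutive year
--             end = years_sorted[i]
--         else:
--             # Gap found, save current range and start new one
--             ranges.append((start, end))
--             start = years_sorted[i]
--             end = years_sorted[i]
--
--     # Add the last range
--     ranges.append((start, end))
--
--     return ranges
-- ===== SOURCE B (Python) =====
-- from itertools import groupby
--
--
-- def _create_year_ranges_from_list(years: list) -> list:
--     """Group sorted years into maximal consecutive runs via the value-minus-index key."""
--     ranges = []
--     for _, grp in groupby(enumerate(sorted(years)), key=lambda p: p[1] - p[0]):
--         vals = [v for _, v in grp]
--         ranges.append((vals[0], vals[-1]))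
--     return ranges
-- ===== Notes on version B (the rewrite author's own statement) =====
-- stated objective: idiomatic
-- what changed: Replaces A's explicit start/end state machine over indices with the idiomatic itertools.groupby over enumerate(sorted(years)) keyed by value - index, emitting (first, last) of each maximal consecutive run.
import Mathlib
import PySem

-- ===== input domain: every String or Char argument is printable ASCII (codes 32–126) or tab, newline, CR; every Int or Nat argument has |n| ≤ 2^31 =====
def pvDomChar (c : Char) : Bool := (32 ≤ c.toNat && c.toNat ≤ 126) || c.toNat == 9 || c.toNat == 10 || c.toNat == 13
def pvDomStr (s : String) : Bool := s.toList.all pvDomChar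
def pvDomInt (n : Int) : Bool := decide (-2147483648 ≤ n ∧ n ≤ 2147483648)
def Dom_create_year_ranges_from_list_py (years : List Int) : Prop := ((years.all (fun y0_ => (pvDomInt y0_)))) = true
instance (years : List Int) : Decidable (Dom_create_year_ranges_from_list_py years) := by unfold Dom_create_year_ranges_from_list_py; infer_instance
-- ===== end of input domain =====

-- B replaces A's explicit start/end state machine by the idiomatic sort + groupby(value - index) pass (objective: idiomatic).

-- ===== PORT A =====
-- A: sort, then an index loop 1..len maintaining (ranges, start, end); emit a range at each gap.
def create_year_ranges_from_list_py (years : List Int) : List (Int × Int) :=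
  if years = [] then []
  else
    let ys := PySem.List.sorted years (fun x => x) false
    let start := PySem.List.pyGetD ys 0 0
    let en := PySem.List.pyGetD ys 0 0
    let st := (PySem.List.pyRange 1 (PySem.List.len ys) 1).foldl
      (fun (acc : List (Int × Int) × Int × Int) i =>
        let y := PySem.List.pyGetD ys i 0
        if y = acc.2.2 + 1 then (acc.1, acc.2.1, y)
        else (acc.1 ++ [(acc.2.1, acc.2.2)], y, y))
      ([], start, en)
    st.1 ++ [(st.2.1, st.2.2)]

-- ===== PORT B =====
-- itertools.groupby over enumerate(sorted(years)) with key p.2 - p.1: split into maximal runs of equal key.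
def pyTakeRun (k : Int) : List (Int × Int) → List (Int × Int) × List (Int × Int)
  | [] => ([], [])
  | p :: rest =>
    if p.2 - p.1 = k then
      let pr := pyTakeRun k rest
      (p :: pr.1, pr.2)
    else ([], p :: rest)

theorem pyTakeRun_rest_length (k : Int) (l : List (Int × Int)) :
    (pyTakeRun k l).2.length ≤ l.length := by
  induction l with
  | nil => simp [pyTakeRun]
  | cons p rest ih =>
    simp only [pyTakeRun]
    split
    · exact Nat.le_succ_of_le ih
    · simp

def pyGroupBy : List (Int × Int) → List (List (Int × Int))
  | [] => []
  | p :: rest =>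
    let pr := pyTakeRun (p.2 - p.1) rest
    (p :: pr.1) :: pyGroupBy pr.2
termination_by l => l.length
decreasing_by
  exact Nat.lt_succ_of_le (pyTakeRun_rest_length _ _)

-- vals = [v for _, v in grp]; append (vals[0], vals[-1])
def pvRangeOfGroup (g : List (Int × Int)) : Int × Int :=
  ((g.map Prod.snd).headD 0, (g.map Prod.snd).getLastD 0)

def create_year_ranges_from_list_py_alt (years : List Int) : List (Int × Int) :=
  (pyGroupBy (PySem.List.enumerate (PySem.List.sorted years (fun x => x) false) 0)).map pvRangeOfGroup

-- ===== PRECONDITION & SPEC =====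
def Spec_create_year_ranges_from_list_py (years : List Int) (out : List (Int × Int)) : Prop := out = create_year_ranges_from_list_py_alt years
instance (years : List Int) (out : List (Int × Int)) : Decidable (Spec_create_year_ranges_from_list_py years out) := by unfold Spec_create_year_ranges_from_list_py; infer_instance

-- ===== CLAIM (what is proved, stated in full; the proofs are below) =====
def Claim_equal_create_year_ranges_from_list_py : Prop := ∀ (years : List Int), Dom_create_year_ranges_from_list_py years → Spec_create_year_ranges_from_list_py years (create_year_ranges_from_list_py years)

-- ===== LEMMAS AND PROOFS =====

theorem pv_last_cons (a d : Int) (l : List Int) : (a :: l).getLast?.getD d = l.getLast?.getD a := by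
  cases l with
  | nil => simp
  | cons b m =>
    rw [List.getLast?_cons_cons]
    obtain ⟨x, hx⟩ := Option.isSome_iff_exists.mp (List.getLast?_isSome.mpr (by simp) : (b :: m).getLast?.isSome)
    simp [hx]

-- A's loop body / finalization, and the step-by-step correspondence:
-- A's fold with state (acc, st, prev) — prev is the previous element of the sorted
-- list and i its enumerate index — equals acc ++ B's remaining groups.
theorem loop_eq_groups (t : List Int) (i st prev : Int) (acc : List (Int × Int)) :
    (t.foldl (fun (a : List (Int × Int) × Int × Int) y =>
        if y = a.2.2 + 1 then (a.1, a.2.1, y)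
        else (a.1 ++ [(a.2.1, a.2.2)], y, y)) (acc, st, prev)).1
      ++ [((t.foldl (fun (a : List (Int × Int) × Int × Int) y =>
        if y = a.2.2 + 1 then (a.1, a.2.1, y)
        else (a.1 ++ [(a.2.1, a.2.2)], y, y)) (acc, st, prev)).2.1,
          (t.foldl (fun (a : List (Int × Int) × Int × Int) y =>
        if y = a.2.2 + 1 then (a.1, a.2.1, y)
        else (a.1 ++ [(a.2.1, a.2.2)], y, y)) (acc, st, prev)).2.2)]
    = acc ++ ((st, ((pyTakeRun (prev - i) (PySem.List.enumerate t (i+1))).1.map Prod.snd).getLastD prev)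
        :: (pyGroupBy (pyTakeRun (prev - i) (PySem.List.enumerate t (i+1))).2).map pvRangeOfGroup) := by
  induction t generalizing i st prev acc with
  | nil => simp [pyTakeRun, PySem.List.enumerate, pyGroupBy]
  | cons y t' ih =>
    simp only [List.foldl_cons, PySem.List.enumerate_cons, pyTakeRun]
    by_cases h : y = prev + 1
    · have hk : y - (i + 1) = prev - i := by omega
      simp only [if_pos h, hk]
      rw [ih (i+1) st y acc]
      simp [hk, List.getLast?_map, pv_last_cons]
    · have hk : ¬ (y - (i + 1) = prev - i) := by omega
      simp only [if_neg h, if_neg hk]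
      rw [ih (i+1) y y (acc ++ [(st, prev)])]
      rw [pyGroupBy]
      simp [pvRangeOfGroup, List.getLast?_map, pv_last_cons]

theorem sorted_nil_iff (l : List Int) : PySem.List.sorted l (fun x => x) false = [] ↔ l = [] := by
  constructor
  · intro h
    have := PySem.List.sorted_perm l (fun x => x) false
    rw [h] at this
    exact (List.Perm.nil_eq this).symm
  · intro h; simp [h, PySem.List.sorted]

-- ===== VERDICT (by name: the statement is the Claim_ definition above) =====
theorem create_year_ranges_from_list_py_spec : Claim_equal_create_year_ranges_from_list_py := by
  intro years _
  unfold Spec_create_year_ranges_from_list_py create_year_ranges_from_list_py create_year_ranges_from_list_py_alt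
  by_cases hy : years = []
  · subst hy
    simp [PySem.List.sorted, pyGroupBy]
  · simp only [if_neg hy]
    have hs : PySem.List.sorted years (fun x => x) false ≠ [] := fun h => hy ((sorted_nil_iff years).mp h)
    obtain ⟨h, t, hht⟩ := List.exists_cons_of_ne_nil hs
    rw [hht]
    rw [PySem.List.foldl_pyRange_pyGetD (h :: t) 0
      (fun (a : List (Int × Int) × Int × Int) y =>
        if y = a.2.2 + 1 then (a.1, a.2.1, y)
        else (a.1 ++ [(a.2.1, a.2.2)], y, y))
      ([], PySem.List.pyGetD (h :: t) 0 0, PySem.List.pyGetD (h :: t) 0 0)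
      (a := 1) (by norm_num)]
    have h0 : PySem.List.pyGetD (h :: t) 0 0 = h := by
      simp [PySem.List.pyGetD, PySem.List.pyGet?, PySem.List.pyIdx?]
    rw [h0]
    simp only [Int.toNat_one, List.drop_one, List.tail_cons]
    rw [loop_eq_groups t 0 h h []]
    rw [PySem.List.enumerate_cons, pyGroupBy]
    simp [pvRangeOfGroup, List.getLast?_map, pv_last_cons]
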